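-- pv_equiv track=rewrite | github.com/kangdh208/TIL | 02week/Python/programmers/PR120923.py | solution
-- ===== SOURCE A (Python) =====
-- def solution(num, total):
--     answer = []
--     if num % 2 == 0:
--         center = total // num
--         left = num // 2 - 1
--         right = num // 2
--     elif num % 2 != 0:
--         center = total // num
--         left = num // 2
--         right = num // 2
--     for i in range(left):
--         answer.append(center - left + i)
--     answer.append(center)
--     for i in range(1, right + 1):
--         answer.append(center + i)
--     return answer
-- ===== SOURCE B (Python) =====
-- def solution(num, total):
--     x = total // num + num // 2
--     out = []
--     for _ in range(num):
--         out.append(x)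
--         x -= 1
--     out.reverse()
--     return out
-- ===== Notes on version B (the rewrite author's own statement) =====
-- stated objective: alternative
-- what changed: Instead of a parity branch and two forward append loops around an explicit center element, B computes only the LAST element total//num + num//2, emits a descending counter num times and reverses the list once at the end.
-- outside the precondition, e.g. on solution(-2, 10): A returns [-5], B returns []; on solution(0, 7): A raises ZeroDivisionError, B raises ZeroDivisionError
import Mathlib
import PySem

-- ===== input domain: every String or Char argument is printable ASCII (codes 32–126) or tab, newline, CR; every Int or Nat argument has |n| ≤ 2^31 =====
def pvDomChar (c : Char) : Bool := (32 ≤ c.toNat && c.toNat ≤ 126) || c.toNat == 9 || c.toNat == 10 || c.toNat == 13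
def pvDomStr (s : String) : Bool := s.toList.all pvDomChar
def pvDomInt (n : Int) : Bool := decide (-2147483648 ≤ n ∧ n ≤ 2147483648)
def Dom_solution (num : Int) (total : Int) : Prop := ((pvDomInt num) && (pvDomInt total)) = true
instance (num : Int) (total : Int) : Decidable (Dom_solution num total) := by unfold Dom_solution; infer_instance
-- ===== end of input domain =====

-- B drops A's parity branch and its two forward loops around an explicit center: it computes
-- only the last element total//num + num//2, emits a descending counter num times and
-- reverses once at the end (objective: alternative).

-- ===== PORT A =====
def solution (num : Int) (total : Int) : List Int :=
  if PySem.Int.mod num 2 = 0 then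
    let center := PySem.Int.floordiv total num
    let left := PySem.Int.floordiv num 2 - 1
    let right := PySem.Int.floordiv num 2
    let answer := (PySem.List.pyRange 0 left 1).foldl (fun acc i => acc ++ [center - left + i]) []
    let answer := answer ++ [center]
    (PySem.List.pyRange 1 (right + 1) 1).foldl (fun acc i => acc ++ [center + i]) answer
  else
    let center := PySem.Int.floordiv total num
    let left := PySem.Int.floordiv num 2
    let right := PySem.Int.floordiv num 2
    let answer := (PySem.List.pyRange 0 left 1).foldl (fun acc i => acc ++ [center - left + i]) []
    let answer := answer ++ [center]
    (PySem.List.pyRange 1 (right + 1) 1).foldl (fun acc i => acc ++ [center + i]) answer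

-- ===== PORT B =====
def solution_alt (num : Int) (total : Int) : List Int :=
  let x := PySem.Int.floordiv total num + PySem.Int.floordiv num 2
  (((PySem.List.pyRange 0 num 1).foldl
      (fun (st : Int × List Int) _ => (st.1 - 1, st.2 ++ [st.1])) (x, [])).2).reverse

-- ===== PRECONDITION & SPEC =====
-- Pre_ restricts to the task's natural domain of positive counts: num = 0 makes A raise
-- ZeroDivisionError, and for negative num A's loops are vacuous (it returns the stray [center]).
def Pre_solution (num : Int) (total : Int) : Prop := 1 ≤ num
instance (num : Int) (total : Int) : Decidable (Pre_solution num total) := by unfold Pre_solution; infer_instance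
def pvWitness_solution : Int × Int := (5, 15)
def Spec_solution (num : Int) (total : Int) (out : List Int) : Prop := out = solution_alt num total
instance (num : Int) (total : Int) (out : List Int) : Decidable (Spec_solution num total out) := by unfold Spec_solution; infer_instance

-- ===== CLAIM (what is proved, stated in full; the proofs are below) =====
def Claim_equal_solution : Prop := ∀ (num : Int) (total : Int), Dom_solution num total → Pre_solution num total → Spec_solution num total (solution num total)

-- ===== LEMMAS AND PROOFS =====

lemma pvSeg_left (c l : Int) (hl : 0 ≤ l) :
    (PySem.List.pyRange 0 l 1).map (fun i => c - l + i) = PySem.List.pyRange (c - l) c 1 := by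
  rw [PySem.List.pyRange_one, PySem.List.pyRange_one, List.map_map]
  have h : (c - (c - l)).toNat = (l - 0).toNat := by omega
  rw [h]
  apply List.map_congr_left
  intro a _
  simp [Function.comp]

lemma pvSeg_right (c r : Int) :
    (PySem.List.pyRange 1 (r + 1) 1).map (fun i => c + i) = PySem.List.pyRange (c + 1) (c + r + 1) 1 := by
  rw [PySem.List.pyRange_one, PySem.List.pyRange_one, List.map_map]
  have h : (c + r + 1 - (c + 1)).toNat = (r + 1 - 1).toNat := by omega
  rw [h]
  apply List.map_congr_left
  intro a _
  simp [Function.comp]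
  ring

lemma pvWhole (c l r : Int) (hl : 0 ≤ l) (hr : 0 ≤ r) :
    (((PySem.List.pyRange 0 l 1).map (fun i => c - l + i)) ++ [c]) ++
        (PySem.List.pyRange 1 (r + 1) 1).map (fun i => c + i)
      = PySem.List.pyRange (c - l) (c + r + 1) 1 := by
  rw [pvSeg_left c l hl, pvSeg_right c r,
      PySem.List.pyRange_one_append (c - l) c (c + r + 1) (by omega) (by omega),
      PySem.List.pyRange_one_append c (c + 1) (c + r + 1) (by omega) (by omega),
      PySem.List.pyRange_one_singleton, List.append_assoc]

-- B's loop invariant: folding the append-descending step over any list of length n turns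
-- (x, acc) into (x - n, acc ++ reverse [x-n+1, …, x]).
lemma pvFold_desc (l : List Int) (x : Int) (acc : List Int) :
    l.foldl (fun (st : Int × List Int) _ => (st.1 - 1, st.2 ++ [st.1])) (x, acc)
      = (x - l.length, acc ++ (PySem.List.pyRange (x - l.length + 1) (x + 1) 1).reverse) := by
  induction l generalizing x acc with
  | nil =>
    simp only [List.foldl_nil, List.length_nil, Int.natCast_zero, sub_zero]
    rw [PySem.List.pyRange_one_eq_nil (by omega)]
    simp
  | cons a t ih =>
    simp only [List.foldl_cons, ih (x - 1) (acc ++ [x]), List.length_cons]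
    refine Prod.ext (by push_cast; ring) ?_
    simp only
    push_cast
    have h1 : x - 1 - (t.length : Int) + 1 = x - ((t.length : Int) + 1) + 1 := by ring
    have h2 : x - 1 + 1 = x := by ring
    rw [h1, h2,
        PySem.List.pyRange_one_append (x - ((t.length:Int)+1) + 1) x (x + 1) (by omega) (by omega),
        PySem.List.pyRange_one_singleton, List.reverse_append, List.reverse_singleton,
        List.append_assoc]

-- ===== VERDICT (by name: the statement is the Claim_ definition above) =====
theorem solution_spec : Claim_equal_solution := by
  intro num total _ hpre
  unfold Pre_solution at hpre
  unfold Spec_solution solution solution_alt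
  have h2 : (0:Int) < 2 := by norm_num
  simp only [PySem.Int.mod_eq_emod_of_pos h2, PySem.Int.floordiv_eq_ediv_of_pos h2,
    PySem.List.foldl_append_singleton_eq_map, List.nil_append, pvFold_desc,
    PySem.List.length_pyRange_one, List.reverse_reverse]
  have hlen : (((num:Int) - 0).toNat : Int) = num := by omega
  rw [hlen]
  set c := PySem.Int.floordiv total num with hc
  split_ifs with hpar
  · rw [pvWhole c (num / 2 - 1) (num / 2) (by omega) (by omega)]
    congr 1 <;> omega
  · rw [pvWhole c (num / 2) (num / 2) (by omega) (by omega)]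
    congr 1 <;> omega
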